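-- pv_equiv track=rewrite | github.com/Leon279/Meeting-Point-Algorithmus | main.py | generateX1
-- ===== SOURCE A (Python) =====
-- import copy
--
-- def generateX1(U, X):
--     UmX = []
--     for element in U:
--         if element not in X:
--             UmX.append(element)
--     X1 = [[]]
--     for n in UmX:
--         prev = copy.deepcopy(X1)
--         [k.append(n) for k in X1]
--         X1.extend(prev)
--     return X1
-- ===== SOURCE B (Python) =====
-- def generateX1(U, X):
--     inX = set(X)
--     UmX = [e for e in U if e not in inX]
--     res = []
--     for i in range(2 ** len(UmX) - 1, -1, -1):
--         subset = []
--         m = i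
--         for e in UmX:
--             if m % 2 == 1:
--                 subset.append(e)
--             m //= 2
--         res.append(subset)
--     return res
-- ===== Notes on version B (the rewrite author's own statement) =====
-- stated objective: alternative
-- what changed: Replaces the iterative doubling with deepcopy/in-place mutation by direct bitmask enumeration: one pass over all masks 2^n-1..0, decoding each mask's bits against the filtered list to build each subset.
import Mathlib
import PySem

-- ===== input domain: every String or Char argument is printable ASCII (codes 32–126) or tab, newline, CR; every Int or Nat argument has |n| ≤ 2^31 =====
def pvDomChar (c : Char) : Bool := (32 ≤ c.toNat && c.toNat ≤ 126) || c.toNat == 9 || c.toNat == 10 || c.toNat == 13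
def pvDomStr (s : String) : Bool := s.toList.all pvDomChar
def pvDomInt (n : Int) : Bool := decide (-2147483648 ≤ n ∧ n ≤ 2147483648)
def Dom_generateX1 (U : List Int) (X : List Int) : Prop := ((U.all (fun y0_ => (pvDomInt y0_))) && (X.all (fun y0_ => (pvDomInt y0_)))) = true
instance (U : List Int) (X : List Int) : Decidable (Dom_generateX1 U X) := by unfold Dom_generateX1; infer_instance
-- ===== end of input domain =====

-- B replaces A's iterative doubling (deepcopy + in-place append + extend) by direct
-- bitmask enumeration over the filtered list; same cost, a genuinely different algorithm.

-- ===== PORT A =====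
def generateX1 (U : List Int) (X : List Int) : List (List Int) :=
  -- UmX = []; for element in U: if element not in X: UmX.append(element)
  let UmX := U.foldl (fun acc e => if X.contains e then acc else acc ++ [e]) ([] : List Int)
  -- X1 = [[]]; for n in UmX: prev = deepcopy(X1); append n to every list of X1; X1.extend(prev)
  UmX.foldl (fun X1 n => X1.map (fun k => k ++ [n]) ++ X1) ([[]] : List (List Int))

-- ===== PORT B =====
def generateX1_alt (U : List Int) (X : List Int) : List (List Int) :=
  let inX := PySem.Set.ofList X
  let UmX := U.filter (fun e => !(PySem.Set.contains inX e))
  -- for i in range(2**len(UmX) - 1, -1, -1): decode the mask bit by bit along UmX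
  (PySem.List.pyRange ((2 : Int) ^ UmX.length - 1) (-1) (-1)).foldl
    (fun res i =>
      res ++ [(UmX.foldl
        (fun (sm : List Int × Int) e =>
          (if PySem.Int.mod sm.2 2 == 1 then sm.1 ++ [e] else sm.1,
           PySem.Int.floordiv sm.2 2))
        (([] : List Int), i)).1])
    ([] : List (List Int))

-- ===== PRECONDITION & SPEC =====
def Spec_generateX1 (U : List Int) (X : List Int) (out : List (List Int)) : Prop := out = generateX1_alt U X
instance (U : List Int) (X : List Int) (out : List (List Int)) : Decidable (Spec_generateX1 U X out) := by unfold Spec_generateX1; infer_instance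

-- ===== CLAIM (what is proved, stated in full; the proofs are below) =====
def Claim_equal_generateX1 : Prop := ∀ (U : List Int) (X : List Int), Dom_generateX1 U X → Spec_generateX1 U X (generateX1 U X)

-- ===== LEMMAS AND PROOFS =====

-- B's inner loop state transformer
def pvStep (sm : List Int × Int) (e : Int) : List Int × Int :=
  (if PySem.Int.mod sm.2 2 == 1 then sm.1 ++ [e] else sm.1, PySem.Int.floordiv sm.2 2)

-- subset decoded from mask i along l
def pvInner (l : List Int) (i : Int) : List Int := (l.foldl pvStep ([], i)).1

-- the descending mask list [2^n - 1, ..., 0]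
def pvMasks (n : Nat) : List Int :=
  (List.range (2 ^ n)).map (fun k : Nat => (2 : Int) ^ n - 1 - (k : Int))

-- A's power-set fold
def pvPow (l : List Int) : List (List Int) :=
  l.foldl (fun X1 n => X1.map (fun k => k ++ [n]) ++ X1) ([[]] : List (List Int))

theorem pvFoldl_state (l : List Int) (s : List Int) (i : Int) :
    l.foldl pvStep (s, i) = (s ++ pvInner l i, PySem.Int.floordiv i (2 ^ l.length)) := by
  induction l generalizing s i with
  | nil =>
    simp [pvInner]
  | cons e l ih =>
    have h1 : (e :: l).foldl pvStep (s, i) = l.foldl pvStep (pvStep (s, i) e) := rfl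
    have h2 : pvInner (e :: l) i
        = (if PySem.Int.mod i 2 == 1 then [e] else []) ++ pvInner l (PySem.Int.floordiv i 2) := by
      show (l.foldl pvStep (pvStep ([], i) e)).1 = _
      simp only [pvStep]
      rw [ih]
      split <;> simp [pvInner]
    rw [h1]
    simp only [pvStep]
    rw [ih]
    have hdd : PySem.Int.floordiv (PySem.Int.floordiv i 2) (2 ^ l.length)
        = PySem.Int.floordiv i (2 ^ (l.length + 1)) := by
      rw [PySem.Int.floordiv_eq_ediv_of_pos (by norm_num : (0:Int) < 2),
          PySem.Int.floordiv_eq_ediv_of_pos (by positivity : (0:Int) < 2 ^ l.length),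
          PySem.Int.floordiv_eq_ediv_of_pos (by positivity : (0:Int) < 2 ^ (l.length + 1)),
          Int.ediv_ediv_of_nonneg (by norm_num : (0:Int) ≤ 2)]
      ring_nf
    rw [h2, hdd]
    have hlc : (e :: l).length = l.length + 1 := rfl
    rw [hlc]
    split <;> simp

theorem pvInner_cons (e : Int) (l : List Int) (i : Int) :
    pvInner (e :: l) i
      = (if PySem.Int.mod i 2 == 1 then [e] else []) ++ pvInner l (PySem.Int.floordiv i 2) := by
  show (l.foldl pvStep (pvStep ([], i) e)).1 = _
  simp only [pvStep]
  rw [pvFoldl_state]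
  split <;> simp [pvInner]

-- the subset depends only on the low l.length bits of the mask
theorem pvInner_add_pow (l : List Int) (i : Int) (hi : 0 ≤ i) :
    pvInner l (i + 2 ^ l.length) = pvInner l i := by
  induction l generalizing i with
  | nil => rfl
  | cons e l ih =>
    rw [pvInner_cons, pvInner_cons]
    have hp : (2 : Int) ^ (e :: l).length = 2 * 2 ^ l.length := by
      rw [List.length_cons]; ring
    have hm : PySem.Int.mod (i + 2 ^ (e :: l).length) 2 = PySem.Int.mod i 2 := by
      rw [PySem.Int.mod_eq_emod_of_pos (by norm_num : (0:Int) < 2),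
          PySem.Int.mod_eq_emod_of_pos (by norm_num : (0:Int) < 2), hp]
      omega
    have hd : PySem.Int.floordiv (i + 2 ^ (e :: l).length) 2
        = PySem.Int.floordiv i 2 + 2 ^ l.length := by
      rw [PySem.Int.floordiv_eq_ediv_of_pos (by norm_num : (0:Int) < 2),
          PySem.Int.floordiv_eq_ediv_of_pos (by norm_num : (0:Int) < 2), hp]
      omega
    have hnn : 0 ≤ PySem.Int.floordiv i 2 := by
      rw [PySem.Int.floordiv_eq_ediv_of_pos (by norm_num : (0:Int) < 2)]; omega
    rw [hm, hd, ih _ hnn]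

theorem pvMasks_mem_bounds (n : Nat) (i : Int) (h : i ∈ pvMasks n) : 0 ≤ i ∧ i < 2 ^ n := by
  simp only [pvMasks, List.mem_map, List.mem_range] at h
  obtain ⟨k, hk, rfl⟩ := h
  have h1 : (k : Int) < (2 : Int) ^ n := by exact_mod_cast hk
  have h2 : (0 : Int) ≤ (k : Int) := Int.natCast_nonneg k
  constructor <;> omega

theorem pvMasks_succ (n : Nat) :
    pvMasks (n + 1) = (pvMasks n).map (· + 2 ^ n) ++ pvMasks n := by
  have hN : 2 ^ (n + 1) = 2 ^ n + 2 ^ n := by ring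
  rw [pvMasks, pvMasks, hN, List.range_add, List.map_append, List.map_map, List.map_map]
  congr 1
  · apply List.map_congr_left
    intro k _
    simp only [Function.comp]
    ring
  · apply List.map_congr_left
    intro k _
    simp only [Function.comp]
    push_cast
    ring

-- appending one element to the base list: each mask's subset gains x iff the mask's top bit is set
theorem pvInner_append_low (l : List Int) (x : Int) (i : Int) (h0 : 0 ≤ i) (h1 : i < 2 ^ l.length) :
    pvInner (l ++ [x]) i = pvInner l i := by
  have hfd : PySem.Int.floordiv i (2 ^ l.length) = 0 := by
    rw [PySem.Int.floordiv_eq_ediv_of_pos (by positivity : (0:Int) < 2 ^ l.length)]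
    exact Int.ediv_eq_zero_of_lt h0 h1
  show ((l ++ [x]).foldl pvStep ([], i)).1 = _
  rw [List.foldl_append]
  have hs := pvFoldl_state l ([] : List Int) i
  simp only [List.nil_append] at hs
  rw [hs, hfd]
  simp [pvStep, pvInner]

theorem pvInner_append_high (l : List Int) (x : Int) (i : Int) (h0 : 0 ≤ i) (h1 : i < 2 ^ l.length) :
    pvInner (l ++ [x]) (i + 2 ^ l.length) = pvInner l i ++ [x] := by
  have hfd : PySem.Int.floordiv (i + 2 ^ l.length) (2 ^ l.length) = 1 := by
    rw [PySem.Int.floordiv_eq_ediv_of_pos (by positivity : (0:Int) < 2 ^ l.length),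
        show i + 2 ^ l.length = i + 1 * 2 ^ l.length by ring,
        Int.add_mul_ediv_right _ _ (by positivity : (0:Int) < 2 ^ l.length).ne',
        Int.ediv_eq_zero_of_lt h0 h1]
    norm_num
  have hper : pvInner l (i + 2 ^ l.length) = pvInner l i := pvInner_add_pow l i h0
  show ((l ++ [x]).foldl pvStep ([], i + 2 ^ l.length)).1 = _
  rw [List.foldl_append]
  have hs := pvFoldl_state l ([] : List Int) (i + 2 ^ l.length)
  simp only [List.nil_append] at hs
  rw [hs, hfd]
  simp [List.foldl_cons, List.foldl_nil, pvStep, hper]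

-- main: decoding all masks in descending order reproduces A's doubling fold
theorem pvMap_inner_masks (l : List Int) :
    (pvMasks l.length).map (pvInner l) = pvPow l := by
  induction l using List.reverseRecOn with
  | nil => rfl
  | append_singleton l x ih =>
    have hlen : (l ++ [x]).length = l.length + 1 := by simp
    rw [hlen, pvMasks_succ, List.map_append, List.map_map]
    have hhigh : (pvMasks l.length).map (pvInner (l ++ [x]) ∘ (· + 2 ^ l.length))
        = ((pvMasks l.length).map (pvInner l)).map (fun k => k ++ [x]) := by
      rw [List.map_map]
      apply List.map_congr_left
      intro i hi
      obtain ⟨h0, h1⟩ := pvMasks_mem_bounds _ _ hi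
      simp only [Function.comp]
      rw [pvInner_append_high l x i h0 h1]
    have hlow : (pvMasks l.length).map (pvInner (l ++ [x]))
        = (pvMasks l.length).map (pvInner l) := by
      apply List.map_congr_left
      intro i hi
      obtain ⟨h0, h1⟩ := pvMasks_mem_bounds _ _ hi
      exact pvInner_append_low l x i h0 h1
    rw [hhigh, hlow, ih]
    simp [pvPow, List.foldl_append]

theorem pvFilter_eq (U X : List Int) :
    U.foldl (fun acc e => if X.contains e then acc else acc ++ [e]) ([] : List Int)
      = U.filter (fun e => !(PySem.Set.contains (PySem.Set.ofList X) e)) := by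
  have h1 : U.foldl (fun acc e => if X.contains e then acc else acc ++ [e]) ([] : List Int)
      = U.foldl (fun acc e => if !(PySem.Set.contains (PySem.Set.ofList X) e) then acc ++ [e] else acc) [] := by
    apply PySem.List.foldl_congr_mem
    intro acc e _
    have hc : PySem.Set.contains (PySem.Set.ofList X) e = X.contains e := by
      cases h : X.contains e with
      | true =>
        have hm : e ∈ X := by simpa using h
        exact (PySem.Set.contains_iff _ _).mpr ((PySem.Set.mem_ofList _ _).mpr hm)
      | false =>
        have hm : e ∉ X := by simpa using h
        have hnc : ¬ (PySem.Set.contains (PySem.Set.ofList X) e = true) :=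
          fun hct => hm ((PySem.Set.mem_ofList _ _).mp ((PySem.Set.contains_iff _ _).mp hct))
        simpa using hnc
    rw [hc]
    cases h : X.contains e <;> simp
  rw [h1, PySem.List.foldl_append_if_eq_filter]
  simp

theorem pvRange_eq_masks (n : Nat) :
    PySem.List.pyRange ((2 : Int) ^ n - 1) (-1) (-1) = pvMasks n := by
  rw [PySem.List.pyRange_neg_one]
  have hp : (0:Int) < (2:Int) ^ n := by positivity
  have hc : ((2 ^ n : Nat) : Int) = (2 : Int) ^ n := by push_cast; rfl
  have h : ((2 : Int) ^ n - 1 - (-1)).toNat = 2 ^ n := by omega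
  rw [h]
  rfl

-- ===== VERDICT (by name: the statement is the Claim_ definition above) =====
theorem generateX1_spec : Claim_equal_generateX1 := by
  intro U X _
  show generateX1 U X = generateX1_alt U X
  unfold generateX1 generateX1_alt
  simp only [pvFilter_eq]
  set l := U.filter (fun e => !(PySem.Set.contains (PySem.Set.ofList X) e)) with hl
  rw [pvRange_eq_masks l.length, PySem.List.foldl_append_singleton_eq_map, List.nil_append]
  exact (pvMap_inner_masks l).symm
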